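-- pv_equiv track=rewrite | github.com/Bor-S/LZW-Compression | Lab3.py | izracunaj_velikost
-- ===== SOURCE A (Python) =====
-- def izracunaj_velikost(KT):
--     max_bits_per_code = 8
--     current_max_code = 255
--     total_bits = 0
--     for i in KT:
--         # Ko dobimo večje kode, povečamo potrebno širino bitov za kodiranje
--         while i > current_max_code:
--             current_max_code = (current_max_code + 1) * 2 - 1
--             max_bits_per_code += 1
--         # Dodamo trenutno največjo širino bitov za vsako kodo
--         total_bits += max_bits_per_code
--     # Pretvorba v bajte
--     total_bytes = (total_bits + 7) // 8
--     return total_bytes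
-- ===== SOURCE B (Python) =====
-- def _level_term(KT, n, b):
--     # contribution of width level b: one extra bit for every position from the
--     # first code needing b bits onward
--     threshold = 1 << (b - 1)
--     idx = next(i for i, c in enumerate(KT) if c >= threshold)
--     return n - idx
--
-- def izracunaj_velikost(KT):
--     # Level-counting formulation: base cost is 8 bits per code; every extra
--     # width level b (9..top) adds one bit per position from the first
--     # occurrence of a code >= 2**(b-1) onward.
--     n = len(KT)
--     m = max(KT, default=0)
--     top = m.bit_length() if m > 255 else 8
--     total_bits = 8 * n
--     for b in range(9, top + 1):
--         total_bits += _level_term(KT, n, b)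
--     return (total_bits + 7) // 8
-- ===== Notes on version B (the rewrite author's own statement) =====
-- stated objective: alternative
-- what changed: B replaces A's per-element running-width accumulation by per-bit-width-level counting: it computes the top width from the list maximum's bit_length, then for each extra width level b in 9..top adds one bit for every position from the first code >= 2**(b-1) onward; A instead walks the list once growing the width by iterative doubling.
import Mathlib
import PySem

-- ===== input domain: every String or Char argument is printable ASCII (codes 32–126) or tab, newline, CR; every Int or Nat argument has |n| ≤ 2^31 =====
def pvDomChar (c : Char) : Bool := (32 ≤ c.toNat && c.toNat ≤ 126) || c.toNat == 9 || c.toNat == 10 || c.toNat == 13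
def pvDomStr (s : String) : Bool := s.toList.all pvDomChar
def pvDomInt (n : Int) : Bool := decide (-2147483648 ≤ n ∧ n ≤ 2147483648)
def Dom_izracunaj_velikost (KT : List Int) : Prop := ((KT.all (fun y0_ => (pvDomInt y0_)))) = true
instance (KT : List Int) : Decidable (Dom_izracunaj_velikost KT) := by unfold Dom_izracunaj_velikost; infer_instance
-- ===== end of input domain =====

-- B replaces A's per-element running-width accumulation by per-width-level counting:
-- each extra bit-width level b (9..top, top from the maximum code) adds one bit for
-- every position from the first code >= 2^(b-1) onward (objective: alternative).

-- ===== PORT A =====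
-- the inner `while i > current_max_code` loop; fuel (i.natAbs + 1) is strictly more
-- iterations than the loop can perform (from cmc ≥ 255 it doubles each step), so the
-- port is exact: when fuel runs out the guard is already false on every reachable state.
def growA : Nat → Int → Int → Int → Int × Int
  | 0, _, cmc, mb => (cmc, mb)
  | n + 1, i, cmc, mb =>
      if i > cmc then growA n i ((cmc + 1) * 2 - 1) (mb + 1) else (cmc, mb)

-- state = (max_bits_per_code, current_max_code, total_bits), exactly A's three variables
def stepA (st : Int × Int × Int) (i : Int) : Int × Int × Int :=
  match growA (i.natAbs + 1) i st.2.1 st.1 with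
  | (cmc', mb') => (mb', cmc', st.2.2 + mb')

def izracunaj_velikost (KT : List Int) : Int :=
  PySem.Int.floordiv ((KT.foldl stepA (8, 255, 0)).2.2 + 7) 8

-- ===== PORT B =====
-- Source B's _level_term: threshold = 1 << (b - 1);
-- idx = next(i for i, c in enumerate(KT) if c >= threshold) is a first-index scan
-- (a qualifying element always exists for b ≤ top, so Python never raises here)
def levelTerm (KT : List Int) (n : Int) (b : Int) : Int :=
  let threshold : Int := (1 : Int) <<< (b - 1).toNat
  n - (KT.findIdx (fun c => decide (threshold ≤ c)) : Int)

def izracunaj_velikost_alt (KT : List Int) : Int :=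
  let n : Int := PySem.List.len KT
  -- m = max(KT, default=0)
  let m : Int := PySem.List.maxD KT (fun x => x) 0
  -- top = m.bit_length() if m > 255 else 8   (m > 255, hence positive, when bit_length is taken)
  let top : Int := if m > 255 then ((PySem.Int.bitLength m : Nat) : Int) else 8
  -- for b in range(9, top + 1): total_bits += _level_term(KT, n, b)
  let total : Int :=
    (PySem.List.pyRange 9 (top + 1) 1).foldl (fun t b => t + levelTerm KT n b) (8 * n)
  PySem.Int.floordiv (total + 7) 8

-- ===== PRECONDITION & SPEC =====
def Spec_izracunaj_velikost (KT : List Int) (out : Int) : Prop := out = izracunaj_velikost_alt KT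
instance (KT : List Int) (out : Int) : Decidable (Spec_izracunaj_velikost KT out) := by unfold Spec_izracunaj_velikost; infer_instance

-- ===== CLAIM (what is proved, stated in full; the proofs are below) =====
def Claim_equal_izracunaj_velikost : Prop := ∀ (KT : List Int), Dom_izracunaj_velikost KT → Spec_izracunaj_velikost KT (izracunaj_velikost KT)

-- ===== LEMMAS AND PROOFS =====

-- the bit width a code i demands: bit_length for positive codes, 0 otherwise
def fW (i : Int) : Nat := if 0 < i then PySem.Int.bitLength i else 0

-- the clean per-element loop both sides are reduced to: state = (width, total_bits)
def stepC (st : Nat × Int) (i : Int) : Nat × Int :=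
  (max st.1 (fW i), st.2 + ((max st.1 (fW i) : Nat) : Int))

-- running maximum width over a list, starting at 8
def wmaxf (KT : List Int) : Nat := KT.foldl (fun w i => max w (fW i)) 8

-- the level-b threshold test, as the stable head symbol the proofs rewrite with
def predT (b : Int) (c : Int) : Bool :=
  let threshold : Int := (1 : Int) <<< (b - 1).toNat
  decide (threshold ≤ c)

lemma levelTerm_eq (KT : List Int) (n b : Int) :
    levelTerm KT n b = n - (KT.findIdx (predT b) : Int) := rfl

lemma fW_le_iff (i : Int) (b : Nat) : fW i ≤ b ↔ i < (2 : Int) ^ b := by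
  have hcast : ((2 ^ b : Nat) : Int) = (2 : Int) ^ b := by push_cast; ring
  unfold fW
  split_ifs with hi
  · constructor
    · intro h
      have h1 : i.natAbs < 2 ^ b :=
        lt_of_lt_of_le (PySem.Int.lt_two_pow_bitLength i) (Nat.pow_le_pow_right (by norm_num) h)
      have h2 : (i.natAbs : Int) < ((2 ^ b : Nat) : Int) := by exact_mod_cast h1
      rwa [Int.natAbs_of_nonneg (le_of_lt hi), hcast] at h2
    · intro h
      by_contra hc
      have h2 : 2 ^ b ≤ i.natAbs := by
        calc 2 ^ b ≤ 2 ^ (PySem.Int.bitLength i - 1) :=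
              Nat.pow_le_pow_right (by norm_num) (by omega)
          _ ≤ i.natAbs := PySem.Int.two_pow_bitLength_le i (by omega)
      have h3 : ((2 ^ b : Nat) : Int) ≤ (i.natAbs : Int) := by exact_mod_cast h2
      rw [Int.natAbs_of_nonneg (le_of_lt hi), hcast] at h3
      omega
  · have h0 : (0 : Int) < 2 ^ b := by positivity
    simp only [Nat.zero_le, true_iff]
    omega

lemma le_fW_iff (i : Int) (b : Nat) (hb : 1 ≤ b) : b ≤ fW i ↔ (2 : Int) ^ (b - 1) ≤ i := by
  have h := fW_le_iff i (b - 1)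
  constructor
  · intro h1
    by_cases hle : (2 : Int) ^ (b - 1) ≤ i
    · exact hle
    · exact absurd (h.mpr (by omega)) (by omega)
  · intro h1
    by_contra hc
    exact absurd h1 (not_le.mpr (h.mp (by omega)))

lemma fW_mono {a b : Int} (h : a ≤ b) : fW a ≤ fW b :=
  (fW_le_iff a (fW b)).mpr (lt_of_le_of_lt h ((fW_le_iff b (fW b)).mp le_rfl))

-- the threshold test at level k+1 is exactly "fW c ≥ k+1"
lemma predT_iff (b : Int) (k : Nat) (hb : b = (k : Int) + 1) (hk : 1 ≤ k) (c : Int) :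
    predT b c = true ↔ k + 1 ≤ fW c := by
  subst hb
  simp only [predT]
  have h1 : ((k : Int) + 1 - 1).toNat = k := by omega
  rw [h1, Int.shiftLeft_eq, one_mul, decide_eq_true_iff, le_fW_iff c (k + 1) (by omega)]
  simp

-- A's inner while loop computes the width max bits (fW i)
lemma growA_eq (fuel : Nat) : ∀ (bits : Nat) (i : Int), i < 2 ^ (bits + fuel) →
    growA fuel i ((2 : Int) ^ bits - 1) (bits : Int) =
      ((2 : Int) ^ (max bits (fW i)) - 1, ((max bits (fW i) : Nat) : Int)) := by
  induction fuel with
  | zero =>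
      intro bits i h
      have hb : fW i ≤ bits := (fW_le_iff i bits).mpr (by simpa using h)
      rw [Nat.max_eq_left hb]
      rfl
  | succ fuel ih =>
      intro bits i h
      by_cases hgt : i > (2 : Int) ^ bits - 1
      · have hb : bits < fW i := by
          have := (le_fW_iff i (bits + 1) (by omega)).mpr (by simpa using (by omega : (2:Int) ^ bits ≤ i))
          omega
        have hstep : ((2 : Int) ^ bits - 1 + 1) * 2 - 1 = (2 : Int) ^ (bits + 1) - 1 := by ring
        have hcast : (bits : Int) + 1 = ((bits + 1 : Nat) : Int) := by push_cast; ring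
        have h' : i < 2 ^ (bits + 1 + fuel) := by
          have e : bits + 1 + fuel = bits + (fuel + 1) := by omega
          rw [e]; exact h
        rw [growA, if_pos hgt, hstep, hcast, ih (bits + 1) i h']
        rw [Nat.max_eq_right (by omega : bits + 1 ≤ fW i),
            Nat.max_eq_right (by omega : bits ≤ fW i)]
      · have hb : fW i ≤ bits := (fW_le_iff i bits).mpr (by omega)
        rw [growA, if_neg hgt, Nat.max_eq_left hb]

-- every Int is below 2 ^ (bits + (i.natAbs + 1)), so the fuel always suffices
lemma fuel_bound (bits : Nat) (i : Int) : i < 2 ^ (bits + (i.natAbs + 1)) := by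
  by_cases hi : i ≤ 0
  · exact lt_of_le_of_lt hi (by positivity)
  · have h1 : i.natAbs < 2 ^ i.natAbs := Nat.lt_two_pow_self
    have e : ((2 ^ i.natAbs : Nat) : Int) = (2 : Int) ^ i.natAbs := by push_cast; ring
    have h2 : (i.natAbs : Int) < (2 : Int) ^ i.natAbs := by rw [← e]; exact_mod_cast h1
    have h3 : i < (2 : Int) ^ i.natAbs := by
      have ha : ((i.natAbs : Nat) : Int) = i := Int.natAbs_of_nonneg (by omega)
      rw [ha] at h2; exact h2
    exact lt_of_lt_of_le h3 (pow_le_pow_right₀ (by norm_num) (by omega))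

-- A's fold equals the clean fold stepC
lemma A_loop : ∀ (KT : List Int) (w : Nat) (tb : Int),
    (KT.foldl stepA ((w : Int), (2 : Int) ^ w - 1, tb)).2.2 = (KT.foldl stepC (w, tb)).2 := by
  intro KT
  induction KT with
  | nil => intro w tb; simp
  | cons i rest ih =>
      intro w tb
      have hA : stepA ((w : Int), (2 : Int) ^ w - 1, tb) i =
          (((max w (fW i) : Nat) : Int),
            (2 : Int) ^ (max w (fW i)) - 1,
            tb + ((max w (fW i) : Nat) : Int)) := by
        unfold stepA
        rw [show ((w : Int), (2 : Int) ^ w - 1, tb).2.1 = (2 : Int) ^ w - 1 from rfl,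
            show ((w : Int), (2 : Int) ^ w - 1, tb).1 = (w : Int) from rfl,
            growA_eq (i.natAbs + 1) w i (fuel_bound w i)]
      have hB : stepC (w, tb) i =
          (max w (fW i), tb + ((max w (fW i) : Nat) : Int)) := rfl
      rw [List.foldl_cons, List.foldl_cons, hA, hB]
      exact ih (max w (fW i)) (tb + _)

-- the first component of the clean fold is the running max width
lemma stepC_fst : ∀ (KT : List Int) (w : Nat) (tb : Int),
    (KT.foldl stepC (w, tb)).1 = KT.foldl (fun w i => max w (fW i)) w := by
  intro KT
  induction KT with
  | nil => intro w tb; rfl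
  | cons i rest ih => intro w tb; exact ih (max w (fW i)) _

-- upper bound for the running max
lemma foldl_max_fW_le : ∀ (KT : List Int) (w c : Nat), w ≤ c → (∀ y ∈ KT, fW y ≤ c) →
    KT.foldl (fun w i => max w (fW i)) w ≤ c := by
  intro KT
  induction KT with
  | nil => intro w c hw _; exact hw
  | cons i rest ih =>
      intro w c hw hall
      exact ih _ c (max_le hw (hall i (by simp))) (fun y hy => hall y (by simp [hy]))

-- a level reached by the running max is witnessed by some element (or by the seed)
lemma exists_of_le_foldl : ∀ (KT : List Int) (w b : Nat),
    b ≤ KT.foldl (fun w i => max w (fW i)) w → b ≤ w ∨ ∃ y ∈ KT, b ≤ fW y := by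
  intro KT
  induction KT with
  | nil => intro w b h; exact Or.inl h
  | cons i rest ih =>
      intro w b h
      rcases ih (max w (fW i)) b h with h1 | ⟨y, hy, hby⟩
      · rcases le_max_iff.mp h1 with h2 | h2
        · exact Or.inl h2
        · exact Or.inr ⟨i, by simp, h2⟩
      · exact Or.inr ⟨y, by simp [hy], hby⟩

lemma wmaxf_ge_8 (KT : List Int) : 8 ≤ wmaxf KT :=
  (PySem.List.le_foldl_max_nat KT fW 8).1

-- B's `top` equals the running max width of A's loop
lemma top_eq (KT : List Int) :
    (if PySem.List.maxD KT (fun x => x) 0 > 255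
      then ((PySem.Int.bitLength (PySem.List.maxD KT (fun x => x) 0) : Nat) : Int) else 8)
    = ((wmaxf KT : Nat) : Int) := by
  cases KT with
  | nil => decide
  | cons x xs =>
      have hm : PySem.List.maxD (x :: xs) (fun x => x) 0 = xs.foldl max x := by
        simp [PySem.List.maxD, PySem.List.max?_id_cons]
      set m := xs.foldl max x with hmdef
      rw [hm]
      have hmem_le : ∀ y ∈ x :: xs, y ≤ m := by
        intro y hy
        rcases List.mem_cons.mp hy with h | h
        · subst h; exact (PySem.List.le_foldl_max xs y).1
        · exact (PySem.List.le_foldl_max xs x).2 y h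
      by_cases h255 : m > 255
      · rw [if_pos h255]
        have hmpos : 0 < m := by omega
        have hfWm : fW m = PySem.Int.bitLength m := by simp [fW, hmpos]
        have h9 : 9 ≤ fW m := by
          rw [le_fW_iff m 9 (by omega)]
          norm_num
          omega
        have hle : wmaxf (x :: xs) ≤ fW m := by
          apply foldl_max_fW_le _ _ _ (by omega)
          intro y hy
          exact fW_mono (hmem_le y hy)
        have hge : fW m ≤ wmaxf (x :: xs) := by
          have hmm : m ∈ x :: xs := by
            rcases PySem.List.foldl_max_mem xs x with h | h
            · rw [hmdef, h]; simp
            · rw [hmdef]; exact List.mem_cons_of_mem _ h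
          exact (PySem.List.le_foldl_max_nat (x :: xs) fW 8).2 m hmm
        have heq : wmaxf (x :: xs) = PySem.Int.bitLength m := by
          rw [← hfWm]; exact le_antisymm hle hge
        rw [heq]
      · rw [if_neg h255]
        have h8 : wmaxf (x :: xs) = 8 := by
          apply le_antisymm
          · apply foldl_max_fW_le _ _ _ le_rfl
            intro y hy
            rw [fW_le_iff]
            have := hmem_le y hy
            norm_num
            omega
          · exact wmaxf_ge_8 _
        rw [h8]; norm_num

-- B's total_bits, written as 8n plus a sum over the extra width levels
def BTot (KT : List Int) : Int :=
  8 * (KT.length : Int)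
    + ((PySem.List.pyRange 9 (((wmaxf KT : Nat) : Int) + 1) 1).map
        (fun b => levelTerm KT (KT.length : Int) b)).sum

lemma alt_eq_BTot (KT : List Int) :
    izracunaj_velikost_alt KT = PySem.Int.floordiv (BTot KT + 7) 8 := by
  simp only [izracunaj_velikost_alt, PySem.List.len_eq, BTot]
  rw [top_eq, PySem.List.foldl_add]

-- the key identity: level counting equals the per-element clean fold
lemma BTot_eq (KT : List Int) : BTot KT = (KT.foldl stepC (8, 0)).2 := by
  induction KT using List.reverseRecOn with
  | nil =>
      simp [BTot, wmaxf, PySem.List.pyRange_one_eq_nil (by norm_num : (9 : Int) ≤ 9)]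
  | append_singleton l x ih =>
      set n := l.length with hn
      set W := wmaxf l with hW
      have hW8 : 8 ≤ W := wmaxf_ge_8 l
      have hW' : wmaxf (l ++ [x]) = max W (fW x) := by
        simp [wmaxf, List.foldl_append, hW]
      have hfst : (l.foldl stepC (8, 0)).1 = W := stepC_fst l 8 0
      -- RHS
      have hRHS : ((l ++ [x]).foldl stepC (8, 0)).2
          = (l.foldl stepC (8, 0)).2 + ((max W (fW x) : Nat) : Int) := by
        rw [List.foldl_append]
        simp [stepC, hfst]
      -- split the range
      have hsplit : PySem.List.pyRange 9 (((wmaxf (l ++ [x]) : Nat) : Int) + 1) 1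
          = PySem.List.pyRange 9 (((W : Nat) : Int) + 1) 1
            ++ PySem.List.pyRange (((W : Nat) : Int) + 1) (((max W (fW x) : Nat) : Int) + 1) 1 := by
        rw [hW']
        exact PySem.List.pyRange_one_append 9 ((W : Int) + 1) (((max W (fW x) : Nat) : Int) + 1)
          (by exact_mod_cast by omega) (by push_cast; simp)
      -- first part: each old level's first index is unchanged; the term grows by 1
      have hfirst : (PySem.List.pyRange 9 (((W : Nat) : Int) + 1) 1).map
            (fun b => levelTerm (l ++ [x]) ((l ++ [x]).length : Int) b)
          = (PySem.List.pyRange 9 (((W : Nat) : Int) + 1) 1).map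
            (fun b => levelTerm l (l.length : Int) b + 1) := by
        apply List.map_congr_left
        intro b hb
        rcases PySem.List.mem_pyRange_one.mp hb with ⟨hb9, hbW⟩
        set k := (b - 1).toNat with hkdef
        have hbk : b = (k : Int) + 1 := by omega
        have hk8 : 8 ≤ k := by omega
        have hkW : k + 1 ≤ W := by omega
        have hex : ∃ y ∈ l, predT b y = true := by
          rcases exists_of_le_foldl l 8 (k + 1) hkW with h | ⟨y, hy, hby⟩
          · omega
          · exact ⟨y, hy, (predT_iff b k hbk (by omega) y).mpr hby⟩
        have hidx : (l ++ [x]).findIdx (predT b) = l.findIdx (predT b) := by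
          rw [List.findIdx_append, if_pos (List.findIdx_lt_length.mpr hex)]
        rw [levelTerm_eq, levelTerm_eq, hidx]
        simp only [List.length_append, List.length_cons, List.length_nil]
        push_cast
        ring
      -- second part: the new levels' first index is n (the appended element)
      have hsecond : (PySem.List.pyRange (((W : Nat) : Int) + 1) (((max W (fW x) : Nat) : Int) + 1) 1).map
            (fun b => levelTerm (l ++ [x]) ((l ++ [x]).length : Int) b)
          = (PySem.List.pyRange (((W : Nat) : Int) + 1) (((max W (fW x) : Nat) : Int) + 1) 1).map
            (fun _ => (1 : Int)) := by
        apply List.map_congr_left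
        intro b hb
        rcases PySem.List.mem_pyRange_one.mp hb with ⟨hbW, hbtop⟩
        set k := (b - 1).toNat with hkdef
        have hbk : b = (k : Int) + 1 := by omega
        have hkW : W ≤ k := by omega
        have hkx : k + 1 ≤ fW x := by
          have h2 : k + 1 ≤ max W (fW x) := by omega
          omega
        have hnone : ∀ y ∈ l, predT b y = false := by
          intro y hy
          have hyW : fW y ≤ W := (PySem.List.le_foldl_max_nat l fW 8).2 y hy
          by_contra hc
          have := (predT_iff b k hbk (by omega) y).mp (by simpa using hc)
          omega
        have hidxl : l.findIdx (predT b) = n :=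
          List.findIdx_eq_length.mpr hnone
        have hpredx : predT b x = true := (predT_iff b k hbk (by omega) x).mpr hkx
        have hidx : (l ++ [x]).findIdx (predT b) = n := by
          rw [List.findIdx_append, if_neg (by rw [hidxl]; omega)]
          have h0 : List.findIdx (predT b) [x] = 0 := by
            rw [List.findIdx_cons, hpredx]
            rfl
          rw [h0, Nat.zero_add]
        rw [levelTerm_eq, hidx]
        simp only [List.length_append, List.length_cons, List.length_nil]
        push_cast
        ring
      -- put the pieces together
      have hlen1 : ((PySem.List.pyRange 9 (((W : Nat) : Int) + 1) 1).length : Int) = (W : Int) - 8 := by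
        rw [PySem.List.length_pyRange_one]
        omega
      have hlen2 : ((PySem.List.pyRange (((W : Nat) : Int) + 1) (((max W (fW x) : Nat) : Int) + 1) 1).length : Int)
          = ((max W (fW x) : Nat) : Int) - (W : Int) := by
        rw [PySem.List.length_pyRange_one]
        have : W ≤ max W (fW x) := le_max_left _ _
        omega
      rw [BTot, hsplit, List.map_append, List.sum_append, hfirst, hsecond, hRHS, ← ih]
      rw [show (fun b => levelTerm l ((l.length : Nat) : Int) b + 1)
            = (fun b => levelTerm l ((l.length : Nat) : Int) b + (fun _ : Int => (1 : Int)) b) from rfl]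
      rw [PySem.List.sum_map_add_int, PySem.List.sum_map_const_int, PySem.List.sum_map_const_int]
      rw [BTot, hlen1, hlen2]
      simp only [List.length_append, List.length_cons, List.length_nil]
      push_cast
      ring

-- ===== VERDICT (by name: the statement is the Claim_ definition above) =====
theorem izracunaj_velikost_spec : Claim_equal_izracunaj_velikost := by
  intro KT _
  unfold Spec_izracunaj_velikost izracunaj_velikost
  rw [alt_eq_BTot, BTot_eq]
  have h := A_loop KT 8 0
  norm_num at h
  rw [h]
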